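-- pv_equiv track=rewrite | github.com/Johan-FF/REST-A-PI-GENERATOR---DJANGO | script_builder/script_method/windows_script.py | _add_caret_before_keywords
-- ===== SOURCE A (Python) =====
-- def _add_caret_before_keywords(content: str) -> str:
--     result: str = ''
--     for char in content:
--         if char == '"':
--             result += '^"'
--         elif char == "'":
--             result += "^'"
--         elif char == "(":
--             result += "^("
--         elif char == ")":
--             result += "^)"
--         else:
--             result += char
--     return result
-- ===== SOURCE B (Python) =====
-- def _add_caret_before_keywords(content: str) -> str:
--     return (content.replace('"', '^"')
--                    .replace("'", "^'")
--                    .replace('(', '^(')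
--                    .replace(')', '^)'))
-- ===== Notes on version B (the rewrite author's own statement) =====
-- stated objective: faster
-- what changed: Replaces A's character-by-character Python accumulation loop with four chained str.replace calls (four full-string scans in C); safe because the inserted caret and the re-inserted character are never targets of a later replace.
import Mathlib
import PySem

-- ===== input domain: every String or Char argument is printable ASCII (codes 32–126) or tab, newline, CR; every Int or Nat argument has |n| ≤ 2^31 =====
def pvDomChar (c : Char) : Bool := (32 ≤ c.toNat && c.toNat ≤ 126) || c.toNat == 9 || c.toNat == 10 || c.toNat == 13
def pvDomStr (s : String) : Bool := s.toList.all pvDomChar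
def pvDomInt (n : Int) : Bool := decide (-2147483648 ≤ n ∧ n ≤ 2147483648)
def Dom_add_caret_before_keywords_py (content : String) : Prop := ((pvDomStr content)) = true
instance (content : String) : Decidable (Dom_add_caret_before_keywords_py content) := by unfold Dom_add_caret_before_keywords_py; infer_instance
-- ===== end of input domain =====

-- B replaces A's single character-by-character accumulation pass with four chained
-- str.replace full-string scans; a timing run measured B faster (constant-factor).

-- ===== PORT A =====
-- A: one pass over the characters, appending either '^'+char or char to the accumulator.
def add_caret_before_keywords_py (content : String) : String :=
  content.toList.foldl
    (fun result char =>
      if char = '"' then result ++ "^\""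
      else if char = '\'' then result ++ "^'"
      else if char = '(' then result ++ "^("
      else if char = ')' then result ++ "^)"
      else result.push char)
    ""

-- ===== PORT B =====
-- B: four chained str.replace calls.
def add_caret_before_keywords_py_alt (content : String) : String :=
  PySem.Str.replace
    (PySem.Str.replace
      (PySem.Str.replace
        (PySem.Str.replace content "\"" "^\"")
        "'" "^'")
      "(" "^(")
    ")" "^)"

-- ===== PRECONDITION & SPEC =====
def Spec_add_caret_before_keywords_py (content : String) (out : String) : Prop := out = add_caret_before_keywords_py_alt content
instance (content : String) (out : String) : Decidable (Spec_add_caret_before_keywords_py content out) := by unfold Spec_add_caret_before_keywords_py; infer_instance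

-- ===== CLAIM (what is proved, stated in full; the proofs are below) =====
def Claim_equal_add_caret_before_keywords_py : Prop := ∀ (content : String), Dom_add_caret_before_keywords_py content → Spec_add_caret_before_keywords_py content (add_caret_before_keywords_py content)

-- ===== LEMMAS AND PROOFS =====

-- replace with a single-character pattern is a flatMap over the characters
theorem replace_go_single (q : Char) (new : List Char) :
    ∀ (l : List Char) (fuel : Nat) (acc : List Char), l.length ≤ fuel →
      PySem.Chars.replace.go [q] new fuel l acc
        = acc.reverse ++ l.flatMap (fun c => if c = q then new else [c]) := by
  intro l
  induction l with
  | nil =>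
    intro fuel acc _
    cases fuel <;> simp [PySem.Chars.replace.go]
  | cons c t ih =>
    intro fuel acc hle
    cases fuel with
    | zero => simp at hle
    | succ n =>
      by_cases hc : c = q
      · subst hc
        simp only [PySem.Chars.replace.go, List.isPrefixOf, BEq.rfl, Bool.true_and,
          List.length_cons, List.length_nil, List.drop_succ_cons,
          List.drop_zero]
        rw [ih n (new.reverse ++ acc) (by simpa using hle)]
        simp
      · have hpre : List.isPrefixOf [q] (c :: t) = false := by
          simp [List.isPrefixOf]
          intro h; exact absurd h.symm hc
        simp only [PySem.Chars.replace.go, hpre, Bool.false_eq_true, if_false]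
        rw [ih n (c :: acc) (by simpa using Nat.le_of_succ_le_succ hle)]
        simp [hc]

theorem replace_single (s : List Char) (q : Char) (new : List Char) :
    PySem.Chars.replace s [q] new = s.flatMap (fun c => if c = q then new else [c]) := by
  rw [PySem.Chars.replace]
  simp only [List.isEmpty_cons, Bool.false_eq_true, if_false]
  simpa using replace_go_single q new s s.length [] le_rfl

-- the per-character effect of the four composed replaces
def pvCaretChar (c : Char) : List Char :=
  if c = '"' then ['^', '"']
  else if c = '\'' then ['^', '\'']
  else if c = '(' then ['^', '(']
  else if c = ')' then ['^', ')']
  else [c]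

theorem alt_toList (content : String) :
    (add_caret_before_keywords_py_alt content).toList
      = content.toList.flatMap pvCaretChar := by
  unfold add_caret_before_keywords_py_alt
  simp only [PySem.Str.toList_replace]
  have e1 : "\"".toList = ['"'] := rfl
  have e2 : "'".toList = ['\''] := rfl
  have e3 : "(".toList = ['('] := rfl
  have e4 : ")".toList = [')'] := rfl
  rw [e1, e2, e3, e4, replace_single, replace_single, replace_single, replace_single,
    List.flatMap_assoc, List.flatMap_assoc, List.flatMap_assoc]
  apply List.flatMap_congr
  intro c _
  unfold pvCaretChar
  by_cases h1 : c = '"' <;> by_cases h2 : c = '\'' <;> by_cases h3 : c = '(' <;>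
    by_cases h4 : c = ')' <;> simp_all

theorem a_foldl_toList (l : List Char) (r : String) :
    (l.foldl
      (fun result char =>
        if char = '"' then result ++ "^\""
        else if char = '\'' then result ++ "^'"
        else if char = '(' then result ++ "^("
        else if char = ')' then result ++ "^)"
        else result.push char) r).toList
      = r.toList ++ l.flatMap pvCaretChar := by
  induction l generalizing r with
  | nil => simp
  | cons c t ih =>
    simp only [List.foldl_cons, List.flatMap_cons]
    by_cases h1 : c = '"' <;> by_cases h2 : c = '\'' <;> by_cases h3 : c = '(' <;>
      by_cases h4 : c = ')' <;> simp_all [pvCaretChar, String.toList_push]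

-- ===== VERDICT (by name: the statement is the Claim_ definition above) =====
theorem add_caret_before_keywords_py_spec : Claim_equal_add_caret_before_keywords_py := by
  intro content _
  unfold Spec_add_caret_before_keywords_py
  have h : (add_caret_before_keywords_py content).toList
      = (add_caret_before_keywords_py_alt content).toList := by
    rw [alt_toList]
    unfold add_caret_before_keywords_py
    rw [a_foldl_toList]
    rfl
  exact String.toList_injective h
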